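-- pv_equiv track=rewrite | github.com/the-omega-institute/automath | theory/2026_golden_ratio_driven_scan_projection_generation_recursive_emergence/scripts/exp_fibonacci_cube_toggle_coxeter_audit.py | _witness_s_star
-- ===== SOURCE A (Python) =====
-- def _witness_s_star(n: int) -> str:
--     """Explicit long-orbit witness S*_n (as a 0/1 word) used in the paper."""
--     n = int(n)
--     if n <= 0:
--         return ""
--     if n < 4:
--         return "0" * n
--     a = ((n + 1) % 3) + 1  # 1-based
--     bits = ["0"] * n
--     j = 0
--     while True:
--         pos = a + 3 * j
--         if pos > n - 4:
--             break
--         bits[pos - 1] = "1"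
--         j += 1
--     return "".join(bits)
-- ===== SOURCE B (Python) =====
-- def _witness_s_star(n: int) -> str:
--     """Explicit long-orbit witness S*_n (as a 0/1 word) used in the paper."""
--     n = int(n)
--     if n <= 0:
--         return ""
--     if n < 4:
--         return "0" * n
--     a = ((n + 1) % 3) + 1  # 1-based start of the AP of 1s
--     count = (n - 4 - a) // 3 + 1 if a <= n - 4 else 0
--     s = "0" * (a - 1) + "100" * count
--     return s.ljust(n, "0")
-- ===== Notes on version B (the rewrite author's own statement) =====
-- stated objective: simpler
-- what changed: A fills an n-cell list with a per-position while loop setting each 1 individually and joins it; B computes the number of 1s in closed form and builds the word directly by block concatenation with ljust padding, avoiding the per-position loop (constant-factor speedup from bulk string operations).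
import Mathlib
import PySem

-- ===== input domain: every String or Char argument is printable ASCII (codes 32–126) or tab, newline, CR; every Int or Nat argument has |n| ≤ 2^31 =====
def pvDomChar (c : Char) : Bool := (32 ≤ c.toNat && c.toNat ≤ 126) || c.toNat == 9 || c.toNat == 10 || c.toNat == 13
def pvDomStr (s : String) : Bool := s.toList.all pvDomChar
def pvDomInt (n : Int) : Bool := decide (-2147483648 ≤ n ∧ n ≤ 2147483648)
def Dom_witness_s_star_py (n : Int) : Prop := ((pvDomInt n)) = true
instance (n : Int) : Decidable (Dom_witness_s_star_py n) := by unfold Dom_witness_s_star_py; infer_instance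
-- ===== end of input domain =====

-- B replaces A's per-position marking loop by a closed-form mark count and block concatenation ("0"*(a-1) + "100"*count, zero-padded): simpler, no loop.


-- ===== PORT A =====
-- A's 'while True' loop: pos = a+3*j; stop when pos > n-4, else set bits[pos-1] := '1'.
-- (On every executed iteration a ≥ 1 and j ≥ 0, so pos-1 ≥ 0: the .toNat index is exact.)
def witness_s_star_loopA (n a : Int) (bits : List Char) (j : Int) : List Char :=
  if a + 3 * j > n - 4 then bits
  else witness_s_star_loopA n a (bits.set (a + 3 * j - 1).toNat '1') (j + 1)
termination_by (n - 4 - (a + 3 * j) + 3).toNat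
decreasing_by omega

def witness_s_star_py (n : Int) : String :=
  if n ≤ 0 then ""
  else if n < 4 then String.mk (List.replicate n.toNat '0')
  else
    let a := PySem.Int.mod (n + 1) 3 + 1
    String.mk (witness_s_star_loopA n a (List.replicate n.toNat '0') 0)

-- ===== PORT B =====
def witness_s_star_py_alt (n : Int) : String :=
  if n ≤ 0 then ""
  else if n < 4 then String.mk (List.replicate n.toNat '0')
  else
    let a := PySem.Int.mod (n + 1) 3 + 1
    let count : Int := if a ≤ n - 4 then PySem.Int.floordiv (n - 4 - a) 3 + 1 else 0
    let s := List.replicate (a - 1).toNat '0' ++ (List.replicate count.toNat ['1', '0', '0']).flatten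
    -- s.ljust(n, "0"): pad with '0' up to length n (never truncates)
    String.mk (s ++ List.replicate (n.toNat - s.length) '0')

-- ===== PRECONDITION & SPEC =====
def Spec_witness_s_star_py (n : Int) (out : String) : Prop := out = witness_s_star_py_alt n
instance (n : Int) (out : String) : Decidable (Spec_witness_s_star_py n out) := by unfold Spec_witness_s_star_py; infer_instance

-- ===== CLAIM (what is proved, stated in full; the proofs are below) =====
def Claim_equal_witness_s_star_py : Prop := ∀ (n : Int), Dom_witness_s_star_py n → Spec_witness_s_star_py n (witness_s_star_py n)

-- ===== LEMMAS AND PROOFS =====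

-- number of marks A's loop still makes from iteration j on
def witness_cnt (n a j : Int) : Nat :=
  if a + 3 * j ≤ n - 4 then ((n - 4 - (a + 3 * j)) / 3 + 1).toNat else 0

-- loop invariant: from state 'filled prefix ++ zero tail', the loop writes the "100" blocks
theorem witness_loop_eq (n a : Int) (c : Nat) :
    ∀ (j : Int) (pre : List Char) (m : Nat), 1 ≤ a → 0 ≤ j →
    witness_cnt n a j = c →
    pre.length = (a + 3 * j - 1).toNat →
    pre.length + m = n.toNat →
    witness_s_star_loopA n a (pre ++ List.replicate m '0') j =
      pre ++ (List.replicate c ['1', '0', '0']).flatten ++ List.replicate (m - 3 * c) '0' := by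
  induction c with
  | zero =>
    intro j pre m ha hj hc hlen hfull
    unfold witness_s_star_loopA
    have hstop : a + 3 * j > n - 4 := by
      by_contra h
      simp [witness_cnt, not_lt.mp h] at hc
      omega
    simp [hstop]
  | succ k ih =>
    intro j pre m ha hj hc hlen hfull
    have hgo : a + 3 * j ≤ n - 4 := by
      by_contra h
      simp [witness_cnt, h] at hc
    have hm : 3 ≤ m := by omega
    unfold witness_s_star_loopA
    rw [if_neg (by omega)]
    have hidx : (a + 3 * j - 1).toNat = pre.length := by omega
    have hrep : (List.replicate m '0' : List Char)
        = '0' :: '0' :: '0' :: List.replicate (m - 3) '0' := by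
      have h3 : m = 3 + (m - 3) := by omega
      rw [h3, List.replicate_add]
      simp
    have hset : (pre ++ List.replicate m '0').set (a + 3 * j - 1).toNat '1'
        = (pre ++ ['1', '0', '0']) ++ List.replicate (m - 3) '0' := by
      rw [hidx, hrep, List.set_append_right _ _ (le_refl _)]
      simp
    rw [hset]
    have hc' : witness_cnt n a (j + 1) = k := by
      unfold witness_cnt at hc ⊢
      rw [if_pos hgo] at hc
      by_cases h2 : a + 3 * (j + 1) ≤ n - 4
      · rw [if_pos h2]; omega
      · rw [if_neg h2]; omega
    rw [ih (j + 1) (pre ++ ['1', '0', '0']) (m - 3) ha (by omega) hc'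
      (by simp; omega) (by simp; omega)]
    have hsub : m - 3 - 3 * k = m - 3 * (k + 1) := by omega
    simp [List.replicate_succ, hsub, List.append_assoc]

theorem witness_core (n : Int) (hn4 : 4 ≤ n) :
    witness_s_star_loopA n (PySem.Int.mod (n + 1) 3 + 1) (List.replicate n.toNat '0') 0 =
      (List.replicate (PySem.Int.mod (n + 1) 3 + 1 - 1).toNat '0' ++
        (List.replicate (if PySem.Int.mod (n + 1) 3 + 1 ≤ n - 4 then
            PySem.Int.floordiv (n - 4 - (PySem.Int.mod (n + 1) 3 + 1)) 3 + 1 else 0).toNat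
          ['1', '0', '0']).flatten) ++
      List.replicate (n.toNat - (List.replicate (PySem.Int.mod (n + 1) 3 + 1 - 1).toNat '0' ++
        (List.replicate (if PySem.Int.mod (n + 1) 3 + 1 ≤ n - 4 then
            PySem.Int.floordiv (n - 4 - (PySem.Int.mod (n + 1) 3 + 1)) 3 + 1 else 0).toNat
          ['1', '0', '0']).flatten).length) '0' := by
  have hmod : PySem.Int.mod (n + 1) 3 = (n + 1) % 3 :=
    PySem.Int.mod_eq_emod_of_pos (by omega)
  set a : Int := PySem.Int.mod (n + 1) 3 + 1 with ha_def
  have ha1 : 1 ≤ a := by rw [ha_def, hmod]; omega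
  have ha3 : a ≤ 3 := by rw [ha_def, hmod]; omega
  set c : Nat := witness_cnt n a 0 with hc_def
  -- B's count agrees with the loop's remaining-mark count at j = 0
  have hcount : (if a ≤ n - 4 then PySem.Int.floordiv (n - 4 - a) 3 + 1 else 0).toNat = c := by
    rw [hc_def]
    unfold witness_cnt
    by_cases hle : a ≤ n - 4
    · rw [if_pos hle, if_pos (by omega),
        PySem.Int.floordiv_eq_ediv_of_pos (by omega)]
      norm_num
    · rw [if_neg hle, if_neg (by omega)]; rfl
  -- split the initial all-zero list at index a-1
  have hsplit : (List.replicate n.toNat '0' : List Char)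
      = List.replicate (a - 1).toNat '0' ++ List.replicate (n.toNat - (a - 1).toNat) '0' := by
    rw [← List.replicate_add]
    congr 1
    omega
  rw [hsplit,
    witness_loop_eq n a c 0 (List.replicate (a - 1).toNat '0') (n.toNat - (a - 1).toNat)
      ha1 le_rfl rfl (by simp; try omega) (by simp; try omega)]
  rw [hcount]
  congr 1
  simp
  omega

theorem witness_s_star_py_eq (n : Int) (hD : Dom_witness_s_star_py n) :
    witness_s_star_py n = witness_s_star_py_alt n := by
  unfold witness_s_star_py witness_s_star_py_alt
  by_cases h0 : n ≤ 0
  · simp [h0]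
  rw [if_neg h0, if_neg h0]
  by_cases h4 : n < 4
  · simp [h4]
  rw [if_neg h4, if_neg h4]
  exact congrArg String.mk (witness_core n (by omega))

-- ===== VERDICT (by name: the statement is the Claim_ definition above) =====
theorem witness_s_star_py_spec : Claim_equal_witness_s_star_py := by
  intro n hD
  unfold Spec_witness_s_star_py
  exact witness_s_star_py_eq n hD
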